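-- pv_equiv track=rewrite | github.com/ivanylsky245/fb-labs-2021 | cp_2/huzenko_fb-91_cp2/code.py | to_bloks
-- ===== SOURCE A (Python) =====
-- def to_bloks(line, key):#OK
--     d = []
--     i = 0
--     while i < key:# проходимся по всем блокам шифротекста Y0 Y1
--         temp = ''
--         j = 0
--         while i + j*key < len(line):# создаём блоки шифротекста Y0= y0+y(r)+y(2r)
--             temp += line[i + j*key]
--             j += 1
--         d.append(temp)
--         i += 1
--     return(d)
-- ===== SOURCE B (Python) =====
-- def to_bloks(line, key):
--     # Same result as A: distribute characters into key buckets in one pass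
--     # instead of gathering each block with a separate strided scan.
--     if key <= 0:
--         return []
--     parts = [''] * key
--     for idx, ch in enumerate(line):
--         parts[idx % key] += ch
--     return parts
-- ===== Notes on version B (the rewrite author's own statement) =====
-- stated objective: simpler
-- what changed: Replaces A's nested loops (an outer loop over the key blocks, each gathered by its own strided index scan line[i + j*key]) with a single enumerate pass that appends each character to bucket idx % key of a preallocated list; key <= 0 yields [] exactly as in A, where the outer loop never runs.
import Mathlib
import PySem

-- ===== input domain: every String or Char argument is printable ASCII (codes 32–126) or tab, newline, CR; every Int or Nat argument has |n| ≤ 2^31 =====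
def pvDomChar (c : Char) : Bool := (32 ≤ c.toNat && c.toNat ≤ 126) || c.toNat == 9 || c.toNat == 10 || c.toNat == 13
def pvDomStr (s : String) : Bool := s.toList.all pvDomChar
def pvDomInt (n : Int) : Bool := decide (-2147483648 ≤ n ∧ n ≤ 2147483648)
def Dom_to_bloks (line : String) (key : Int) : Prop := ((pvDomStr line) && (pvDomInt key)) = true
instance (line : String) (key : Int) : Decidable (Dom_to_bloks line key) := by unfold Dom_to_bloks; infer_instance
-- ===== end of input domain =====

-- B replaces A's per-block strided gather loops with one bucket-distribution pass over the string; same result, similar cost (objective: simpler).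

-- ===== PORT A =====
-- inner while loop of A: `temp += line[i + j*key]; j += 1` while `i + j*key < len(line)`.
-- The conjuncts `1 ≤ key` and `0 ≤ i + j*key` are termination/totality support only: at every
-- reachable call key ≥ 1 and i, j ≥ 0, so the guard coincides with Python's `i + j*key < len(line)`.
def tbInner (line : List Char) (key i j : Int) (temp : List Char) : List Char :=
  if h : 1 ≤ key ∧ 0 ≤ i + j * key ∧ i + j * key < (line.length : Int) then
    match PySem.List.pyGet? line (i + j * key) with
    | some c => tbInner line key i (j + 1) (temp ++ [c])
    | none => temp
  else temp
termination_by ((line.length : Int) - (i + j * key)).toNat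
decreasing_by
  have : (j + 1) * key = j * key + key := by ring
  rw [this]; omega

-- outer while loop of A: `d.append(temp); i += 1` while `i < key`.
def tbOuter (line : List Char) (key i : Int) (d : List String) : List String :=
  if h : i < key then
    tbOuter line key (i + 1) (d ++ [String.ofList (tbInner line key i 0 [])])
  else d
termination_by (key - i).toNat

def to_bloks (line : String) (key : Int) : List String :=
  tbOuter line.toList key 0 []

-- ===== PORT B =====
def to_bloks_alt (line : String) (key : Int) : List String :=
  if key ≤ 0 then []
  else
    ((PySem.List.enumerate line.toList 0).foldl
      (fun parts p =>
        PySem.List.pySetD parts (PySem.Int.mod p.1 key)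
          (PySem.List.pyGetD parts (PySem.Int.mod p.1 key) [] ++ [p.2]))
      (List.replicate key.toNat [])).map (fun cs => String.ofList cs)

-- ===== PRECONDITION & SPEC =====
-- A returns normally on every input (key ≤ 0 just skips the loop), so there is no Pre_.
def Spec_to_bloks (line : String) (key : Int) (out : List String) : Prop := out = to_bloks_alt line key
instance (line : String) (key : Int) (out : List String) : Decidable (Spec_to_bloks line key out) := by unfold Spec_to_bloks; infer_instance

-- ===== CLAIM =====
def Claim_equal_to_bloks : Prop := ∀ (line : String) (key : Int), Dom_to_bloks line key → Spec_to_bloks line key (to_bloks line key)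

-- ===== LEMMAS AND PROOFS =====
lemma tbInner_acc (line : List Char) (key i j : Int) :
    ∀ t', tbInner line key i j t' = t' ++ tbInner line key i j [] := by
  refine tbInner.induct line key i (fun j _ => ∀ t', tbInner line key i j t' = t' ++ tbInner line key i j []) ?_ ?_ ?_ j []
  · intro j temp h c hc ih t'
    rw [tbInner, tbInner]
    simp only [dif_pos h, hc]
    rw [ih (t' ++ [c]), ih ([] ++ [c])]
    simp
  · intro j temp h hc t'
    rw [tbInner, tbInner]
    simp [dif_pos h, hc]
  · intro j temp h t'
    rw [tbInner, tbInner]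
    simp [dif_neg h]

lemma tbInner_snoc (xs : List Char) (c : Char) (key i : Int) (hk : 1 ≤ key) (hi : 0 ≤ i) (j : Int) :
    0 ≤ j → tbInner (xs ++ [c]) key i j [] =
      tbInner xs key i j [] ++
        (if i + j * key ≤ (xs.length : Int) ∧ key ∣ ((xs.length : Int) - i) then [c] else []) := by
  refine tbInner.induct xs key i (fun j _ => 0 ≤ j → tbInner (xs ++ [c]) key i j [] =
      tbInner xs key i j [] ++
        (if i + j * key ≤ (xs.length : Int) ∧ key ∣ ((xs.length : Int) - i) then [c] else [])) ?_ ?_ ?_ j []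
  · intro j temp h c' hc ih hj
    obtain ⟨-, h0, hlt⟩ := h
    rw [PySem.List.pyGet?_of_nonneg _ h0] at hc
    have hnat : (i + j * key).toNat < xs.length := by omega
    have hg : PySem.List.pyGet? (xs ++ [c]) (i + j * key) = some c' := by
      rw [PySem.List.pyGet?_of_nonneg _ h0, List.getElem?_append_left hnat]
      exact hc
    have hguard : 1 ≤ key ∧ 0 ≤ i + j * key ∧ i + j * key < ((xs ++ [c]).length : Int) := by
      refine ⟨hk, h0, ?_⟩
      simp only [List.length_append, List.length_cons, List.length_nil]
      push_cast
      omega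
    have hxs : tbInner xs key i j [] = tbInner xs key i (j+1) [c'] := by
      rw [tbInner]
      simp only [dif_pos (⟨hk, h0, hlt⟩ : 1 ≤ key ∧ 0 ≤ i + j * key ∧ i + j * key < (xs.length : Int)),
        PySem.List.pyGet?_of_nonneg _ h0, hc, List.nil_append]
    rw [hxs]
    conv_lhs => rw [tbInner]
    simp only [dif_pos hguard, hg, List.nil_append]
    rw [tbInner_acc _ _ _ _ [c'], tbInner_acc xs key i (j+1) [c']]
    rw [ih (by omega)]
    have hcond : (i + (j + 1) * key ≤ (xs.length : Int) ∧ key ∣ ((xs.length : Int) - i)) ↔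
        (i + j * key ≤ (xs.length : Int) ∧ key ∣ ((xs.length : Int) - i)) := by
      have hjk : (j + 1) * key = j * key + key := by ring
      constructor
      · rintro ⟨h1, h2⟩
        exact ⟨by omega, h2⟩
      · rintro ⟨h1, h2⟩
        refine ⟨?_, h2⟩
        have hd : key ∣ ((xs.length : Int) - (i + j * key)) := by
          have he : (xs.length : Int) - (i + j * key) = ((xs.length : Int) - i) - j * key := by ring
          rw [he]
          exact dvd_sub h2 (dvd_mul_left key j)
        have := Int.le_of_dvd (by omega) hd
        omega
    rw [if_congr hcond rfl rfl]
    simp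
  · intro j temp h hc _
    exfalso
    rw [PySem.List.pyGet?_of_nonneg _ h.2.1] at hc
    have := List.getElem?_eq_none_iff.mp hc
    omega
  · intro j temp h hj
    have hjk0 : 0 ≤ j * key := mul_nonneg hj (by omega)
    have hnlt : ¬ (i + j * key < (xs.length : Int)) := fun hlt => h ⟨hk, by omega, hlt⟩
    have hxs : tbInner xs key i j [] = [] := by
      rw [tbInner]; simp [dif_neg h]
    rw [hxs, List.nil_append]
    by_cases heq : i + j * key = (xs.length : Int)
    · have hguard : 1 ≤ key ∧ 0 ≤ i + j * key ∧ i + j * key < ((xs ++ [c]).length : Int) := by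
        refine ⟨hk, by omega, ?_⟩
        simp only [List.length_append, List.length_cons, List.length_nil]
        push_cast
        omega
      have hg : PySem.List.pyGet? (xs ++ [c]) (i + j * key) = some c := by
        rw [heq]
        exact PySem.List.pyGet?_append_length (pre := xs) (y := c) (ys := [])
      conv_lhs => rw [tbInner]
      simp only [dif_pos hguard, hg, List.nil_append]
      have hstop : tbInner (xs ++ [c]) key i (j + 1) [c] = [c] := by
        rw [tbInner]
        have hjk : (j + 1) * key = j * key + key := by ring
        have hng : ¬ (1 ≤ key ∧ 0 ≤ i + (j+1) * key ∧ i + (j+1) * key < ((xs ++ [c]).length : Int)) := by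
          simp only [List.length_append, List.length_cons, List.length_nil]
          push_cast
          omega
        exact dif_neg hng
      rw [hstop]
      rw [if_pos ⟨by omega, by
        have : (xs.length : Int) - i = j * key := by omega
        rw [this]
        exact dvd_mul_left key j⟩]
    · rw [tbInner]
      have hng : ¬ (1 ≤ key ∧ 0 ≤ i + j * key ∧ i + j * key < ((xs ++ [c]).length : Int)) := by
        simp only [List.length_append, List.length_cons, List.length_nil]
        push_cast
        omega
      simp only [dif_neg hng]
      rw [if_neg (by rintro ⟨h1, -⟩; omega)]

def bucket (k b : Nat) : List Char → Nat → List Char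
  | [], _ => []
  | c :: cs, n => (if n % k = b then [c] else []) ++ bucket k b cs (n + 1)

lemma bucket_append (k b : Nat) (xs ys : List Char) :
    ∀ n, bucket k b (xs ++ ys) n = bucket k b xs n ++ bucket k b ys (n + xs.length) := by
  induction xs with
  | nil => intro n; simp [bucket]
  | cons c cs ih =>
      intro n
      simp only [List.cons_append, bucket, ih (n + 1), List.length_cons, List.append_assoc]
      ring_nf

lemma cond_iff (len : Nat) (key i : Int) (hk : 1 ≤ key) (hi : 0 ≤ i) (hik : i < key) :
    ((i ≤ (len : Int)) ∧ key ∣ ((len : Int) - i)) ↔ (len % key.toNat = i.toNat) := by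
  have hkey : ((key.toNat : Int)) = key := by omega
  have hcast : ((len % key.toNat : Nat) : Int) = (len : Int) % key := by
    push_cast
    rw [hkey]
  constructor
  · rintro ⟨h1, q, hq⟩
    have : (len : Int) % key = i := by
      have : (len : Int) = i + key * q := by omega
      rw [this, Int.add_mul_emod_self_left]
      exact Int.emod_eq_of_lt hi hik
    omega
  · intro h
    have hmod : (len : Int) % key = i := by omega
    constructor
    · have := Int.emod_nonneg (len : Int) (by omega : key ≠ 0)
      have h2 : (len : Int) % key ≤ len := by
        by_cases hc : key ≤ (len : Int)
        · have := Int.emod_lt_of_pos (len : Int) (by omega : 0 < key)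
          omega
        · rw [Int.emod_eq_of_lt (by positivity) (by omega : (len : Int) < key)]
      omega
    · have : (len : Int) - i = key * ((len : Int) / key) := by
        have := Int.emod_add_ediv (len : Int) key
        omega
      exact ⟨(len : Int) / key, this⟩

lemma inner_eq_bucket (key i : Int) (hk : 1 ≤ key) (hi : 0 ≤ i) (hik : i < key) :
    ∀ xs : List Char, tbInner xs key i 0 [] = bucket key.toNat i.toNat xs 0 := by
  intro xs
  induction xs using List.reverseRecOn with
  | nil =>
      rw [tbInner, dif_neg (by rintro ⟨-, h0, hlt⟩; simp at hlt; omega)]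
      simp [bucket]
  | append_singleton xs c ih =>
      rw [tbInner_snoc xs c key i hk hi 0 le_rfl, ih]
      rw [bucket_append]
      simp only [zero_mul, add_zero, zero_add, bucket, List.append_nil]
      congr 1
      rw [if_congr (cond_iff xs.length key i hk hi hik) rfl rfl]

lemma tbOuter_acc (line : List Char) (key i : Int) (d : List String) :
    ∀ d', tbOuter line key i d' = d' ++ tbOuter line key i [] := by
  refine tbOuter.induct line key (fun i _ => ∀ d', tbOuter line key i d' = d' ++ tbOuter line key i []) ?_ ?_ i d
  · intro i d h ih d'
    conv_lhs => rw [tbOuter]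
    conv_rhs => rw [tbOuter]
    simp only [dif_pos h]
    rw [ih (d' ++ [String.ofList (tbInner line key i 0 [])]),
        ih ([] ++ [String.ofList (tbInner line key i 0 [])])]
    simp
  · intro i d h d'
    conv_lhs => rw [tbOuter]
    conv_rhs => rw [tbOuter]
    simp [dif_neg h]

lemma tbOuter_map (line : List Char) (key : Int) :
    ∀ i, tbOuter line key i [] =
      (PySem.List.pyRange i key 1).map (fun b => String.ofList (tbInner line key b 0 [])) := by
  intro i
  refine tbOuter.induct line key (fun i _ => tbOuter line key i [] =
      (PySem.List.pyRange i key 1).map (fun b => String.ofList (tbInner line key b 0 []))) ?_ ?_ i []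
  · intro i d h ih
    rw [tbOuter]
    simp only [dif_pos h]
    rw [tbOuter_acc line key (i+1) [] ([] ++ [String.ofList (tbInner line key i 0 [])])]
    rw [ih]
    rw [PySem.List.pyRange_one_cons h]
    simp
  · intro i d h
    rw [tbOuter]
    simp only [dif_neg h]
    rw [PySem.List.pyRange_one_eq_nil (by omega)]
    simp

lemma map_getD_range {α : Type} (parts : List α) (k : Nat) (d : α) (hp : parts.length = k) :
    (List.range k).map (fun b => parts.getD b d) = parts := by
  apply List.ext_getElem
  · simp [hp]
  · intro n h1 h2
    simp only [List.getElem_map, List.getElem_range]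
    rw [List.getD_eq_getElem parts d (by omega)]

lemma foldB (key : Int) (hkey : 0 < key) :
    ∀ (xs : List Char) (n : Nat) (parts : List (List Char)), parts.length = key.toNat →
      ((PySem.List.enumerate xs (n : Int)).foldl
        (fun parts p => PySem.List.pySetD parts (PySem.Int.mod p.1 key)
          (PySem.List.pyGetD parts (PySem.Int.mod p.1 key) [] ++ [p.2])) parts)
      = (List.range key.toNat).map (fun b => parts.getD b [] ++ bucket key.toNat b xs n) := by
  intro xs
  induction xs with
  | nil =>
      intro n parts hp
      simp only [PySem.List.enumerate_nil, List.foldl_nil, bucket, List.append_nil]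
      exact (map_getD_range parts key.toNat [] hp).symm
  | cons c cs ih =>
      intro n parts hp
      have hkc : ((key.toNat : Int)) = key := by omega
      have hm : PySem.Int.mod ((n : Int)) key = ((n % key.toNat : Nat) : Int) := by
        rw [← hkc, PySem.Int.mod_natCast]; simp
      have hmlt : n % key.toNat < parts.length := by
        rw [hp]; exact Nat.mod_lt n (by omega)
      rw [PySem.List.enumerate_cons, List.foldl_cons]
      simp only [hm, PySem.List.pySetD_natCast, PySem.List.pyGetD_natCast]
      have : ((n : Int) + 1) = (((n + 1 : Nat)) : Int) := by push_cast; ring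
      rw [this, ih (n + 1) _ (by rw [List.length_set]; exact hp)]
      apply List.map_congr_left
      intro b hb
      rw [List.mem_range] at hb
      by_cases hbm : b = n % key.toNat
      · subst hbm
        simp [List.getD, hmlt, bucket]
      · simp [List.getD, bucket, Ne.symm hbm]

lemma to_bloks_eq_alt (line : String) (key : Int) : to_bloks line key = to_bloks_alt line key := by
  by_cases hk : key ≤ 0
  · unfold to_bloks to_bloks_alt
    rw [if_pos hk, tbOuter, dif_neg (by omega : ¬ ((0:Int) < key))]
  · have hk' : 0 < key := by omega
    unfold to_bloks to_bloks_alt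
    rw [if_neg hk]
    rw [tbOuter_map line.toList key 0]
    rw [show (PySem.List.enumerate line.toList 0) = (PySem.List.enumerate line.toList ((0:Nat):Int)) from by norm_num]
    rw [foldB key hk' line.toList 0 (List.replicate key.toNat []) (by simp)]
    rw [PySem.List.pyRange_one]
    simp only [sub_zero, List.map_map]
    apply List.map_congr_left
    intro b hb
    rw [List.mem_range] at hb
    have hb' : ((b : Int)) < key := by omega
    simp only [Function.comp_apply, zero_add]
    rw [inner_eq_bucket key (b:Int) (by omega) (by positivity) hb']
    simp

-- ===== VERDICT =====
theorem to_bloks_spec : Claim_equal_to_bloks :=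
  fun line key _ => to_bloks_eq_alt line key
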